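-- pv_equiv track=rewrite | github.com/Toruhiyo/trujilloai-landing-backend | src/utils/dict_toolbox.py | get_list_of_values_from_dict_per_depth_level
-- ===== SOURCE A (Python) =====
-- from typing import Any, Sequence
--
-- def get_list_of_values_from_dict_per_depth_level(d: dict, depth: int) -> list[Any]:
--     values = []
--     for key, value in d.items():
--         if type(value) is dict:
--             if depth - 1 == 1:
--                 values.extend(list(value.values()))
--             elif depth > 0:
--                 values.extend(
--                     get_list_of_values_from_dict_per_depth_level(value, depth - 1)
--                 )
--             else:
--                 raise Exception("Invalid depth level. Must be >= 0.")
--         else: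
--             values.append({key: value})
--     return values
-- ===== SOURCE B (Python) =====
-- def get_list_of_values_from_dict_per_depth_level(d: dict, depth: int) -> list:
--     result = []
--     stack = [(iter(d.items()), depth)]
--     while stack:
--         items, level = stack[-1]
--         entry = next(items, None)
--         if entry is None:
--             stack.pop()
--             continue
--         key, value = entry
--         if type(value) is dict:
--             if level - 1 == 1:
--                 result.extend(value.values())
--             elif level > 0:
--                 stack.append((iter(value.items()), level - 1))
--             else:
--                 raise Exception("Invalid depth level. Must be >= 0.")
--         else:
--             result.append({key: value})
--     return result
-- ===== Notes on version B (the rewrite author's own statement) =====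
-- stated objective: alternative
-- what changed: Replaces the recursion with an explicit iterative depth-first traversal over a stack of (items-iterator, level) frames accumulating into one result list; Pre_ excludes depth <= 0 with nonempty input (both programs raise Exception there) and depth == 2 with nonempty input, where both programs return a list of raw inner ints, which is not a value of the ported return type List (List (String x Int)).
-- outside the precondition, e.g. on get_list_of_values_from_dict_per_depth_level({'a': {'x': 1}}, 2): A returns [1], B returns [1]
import Mathlib
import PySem

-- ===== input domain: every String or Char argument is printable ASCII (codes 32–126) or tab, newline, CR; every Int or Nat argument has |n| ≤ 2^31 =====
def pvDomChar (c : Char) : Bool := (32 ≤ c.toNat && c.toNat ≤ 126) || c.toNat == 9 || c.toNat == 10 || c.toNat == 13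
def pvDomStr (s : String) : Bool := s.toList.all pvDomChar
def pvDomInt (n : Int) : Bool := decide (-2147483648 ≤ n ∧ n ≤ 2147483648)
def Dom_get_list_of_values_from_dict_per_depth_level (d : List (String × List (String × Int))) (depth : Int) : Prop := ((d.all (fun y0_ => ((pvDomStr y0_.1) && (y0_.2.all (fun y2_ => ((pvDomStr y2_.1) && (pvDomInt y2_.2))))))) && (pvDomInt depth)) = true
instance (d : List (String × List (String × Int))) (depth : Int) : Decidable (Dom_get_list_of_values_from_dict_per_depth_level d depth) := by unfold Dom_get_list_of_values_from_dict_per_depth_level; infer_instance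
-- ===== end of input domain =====

-- B replaces A's recursion by an explicit iterative depth-first traversal over a stack of
-- (items-iterator, level) frames with one accumulated result list (objective: alternative).


-- ===== PORT A =====
-- A's recursive call descends into an inner dict of type dict[str, int]; this helper is
-- its monomorphised transliteration: every inner value is an int (not a dict), so each
-- item takes the 'else' branch and appends {key: value}.
def get_list_inner (d : List (String × Int)) (depth : Int) : List (List (String × Int)) :=
  d.foldl (fun values kv => values ++ [[(kv.1, kv.2)]]) []

def get_list_of_values_from_dict_per_depth_level (d : List (String × List (String × Int))) (depth : Int) : List (List (String × Int)) :=
  d.foldl (fun values kv =>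
    -- type(value) is dict holds for every outer value under the declared type
    if depth - 1 == 1 then
      values      -- Python extends with the inner dicts' raw int values: not a value of
                  -- the ported return type; outside Pre_ (only d = [] remains)
    else if depth > 0 then
      values ++ get_list_inner kv.2 (depth - 1)
    else
      values      -- Python raises Exception here; outside Pre_
    ) []

-- ===== PORT B =====
-- A stack frame of Source B: (iterator over an outer dict's remaining items, level), or
-- (iterator over an inner dict's remaining items, level); monomorphised into two cases.
inductive PVFrame where
  | outer : List (String × List (String × Int)) → Int → PVFrame
  | inner : List (String × Int) → Int → PVFrame

def pvFrameSize : PVFrame → Nat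
  | .outer l _ => 1 + (l.map (fun kv => 2 + kv.2.length)).sum
  | .inner l _ => 1 + l.length

-- the while-loop of Source B: peek the top frame, advance its iterator, branch as in Source B
def pvLoop (stack : List PVFrame) (result : List (List (String × Int))) : List (List (String × Int)) :=
  match stack with
  | [] => result
  | PVFrame.outer l lvl :: rest =>
    match l with
    | [] => pvLoop rest result                      -- iterator exhausted: pop the frame
    | (_, v) :: tl =>                               -- outer value: type(value) is dict
      if lvl - 1 == 1 then
        pvLoop (PVFrame.outer tl lvl :: rest) result  -- Python extends with raw ints: not of the ported type; outside Pre_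
      else if lvl > 0 then
        pvLoop (PVFrame.inner v (lvl - 1) :: PVFrame.outer tl lvl :: rest) result
      else
        result                                        -- Python raises Exception here; outside Pre_
  | PVFrame.inner l lvl :: rest =>
    match l with
    | [] => pvLoop rest result                      -- pop
    | (k, v) :: tl =>                               -- inner value is an int: else branch, append {key: value}
      pvLoop (PVFrame.inner tl lvl :: rest) (result ++ [[(k, v)]])
termination_by (stack.map pvFrameSize).sum
decreasing_by all_goals first | (simp [pvFrameSize]; omega) | simp [pvFrameSize]

def get_list_of_values_from_dict_per_depth_level_alt (d : List (String × List (String × Int))) (depth : Int) : List (List (String × Int)) :=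
  pvLoop [PVFrame.outer d depth] []

-- ===== PRECONDITION & SPEC =====
-- Pre_ excludes exactly (i) depth ≤ 0 with nonempty d, where both Pythons raise Exception,
-- and (ii) depth = 2 with nonempty d, where both Pythons return the same list of raw inner
-- ints — a value that is not of the ported return type List (List (String × Int)).
def Pre_get_list_of_values_from_dict_per_depth_level (d : List (String × List (String × Int))) (depth : Int) : Prop :=
  (0 < depth ∧ depth ≠ 2) ∨ d = []
instance (d : List (String × List (String × Int))) (depth : Int) : Decidable (Pre_get_list_of_values_from_dict_per_depth_level d depth) := by unfold Pre_get_list_of_values_from_dict_per_depth_level; infer_instance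

def pvWitness_get_list_of_values_from_dict_per_depth_level : (List (String × List (String × Int))) × Int :=
  ([("a", [("x", 1), ("y", 2)]), ("b", [("z", 3)])], 1)

def Spec_get_list_of_values_from_dict_per_depth_level (d : List (String × List (String × Int))) (depth : Int) (out : List (List (String × Int))) : Prop := out = get_list_of_values_from_dict_per_depth_level_alt d depth
instance (d : List (String × List (String × Int))) (depth : Int) (out : List (List (String × Int))) : Decidable (Spec_get_list_of_values_from_dict_per_depth_level d depth out) := by unfold Spec_get_list_of_values_from_dict_per_depth_level; infer_instance

-- ===== CLAIM (what is proved, stated in full; the proofs are below) =====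
def Claim_equal_get_list_of_values_from_dict_per_depth_level : Prop := ∀ (d : List (String × List (String × Int))) (depth : Int), Dom_get_list_of_values_from_dict_per_depth_level d depth → Pre_get_list_of_values_from_dict_per_depth_level d depth → Spec_get_list_of_values_from_dict_per_depth_level d depth (get_list_of_values_from_dict_per_depth_level d depth)

-- ===== LEMMAS AND PROOFS =====
theorem get_list_inner_eq (d : List (String × Int)) (depth : Int) :
    get_list_inner d depth = d.map (fun p => [p]) := by
  unfold get_list_inner
  rw [PySem.List.foldl_append_singleton_eq_map (f := fun kv : String × Int => [(kv.1, kv.2)])]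
  simp

theorem pvLoop_inner (l : List (String × Int)) (lvl : Int) (rest : List PVFrame)
    (result : List (List (String × Int))) :
    pvLoop (PVFrame.inner l lvl :: rest) result = pvLoop rest (result ++ l.map (fun p => [p])) := by
  induction l generalizing result with
  | nil => simp [pvLoop]
  | cons h tl ih =>
    obtain ⟨k, v⟩ := h
    rw [pvLoop, ih, List.append_assoc]
    simp

theorem pvLoop_outer (l : List (String × List (String × Int))) (lvl : Int)
    (rest : List PVFrame) (result : List (List (String × Int)))
    (hpos : 0 < lvl) (hne2 : lvl ≠ 2) :
    pvLoop (PVFrame.outer l lvl :: rest) result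
      = pvLoop rest (result ++ l.flatMap (fun kv => kv.2.map (fun p => [p]))) := by
  induction l generalizing result with
  | nil => simp [pvLoop]
  | cons h tl ih =>
    obtain ⟨k, v⟩ := h
    have h1 : (lvl - 1 == 1) = false := by simp only [beq_eq_false_iff_ne]; omega
    rw [pvLoop]
    simp only [h1, Bool.false_eq_true, if_false, if_pos hpos]
    rw [pvLoop_inner, ih, List.flatMap_cons, List.append_assoc]

-- ===== VERDICT (by name: the statement is the Claim_ definition above) =====
theorem get_list_of_values_from_dict_per_depth_level_spec : Claim_equal_get_list_of_values_from_dict_per_depth_level := by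
  intro d depth _ hpre
  show _ = _
  unfold get_list_of_values_from_dict_per_depth_level get_list_of_values_from_dict_per_depth_level_alt
  rcases hpre with ⟨hpos, hne2⟩ | hnil
  · have h1 : (depth - 1 == 1) = false := by simp only [beq_eq_false_iff_ne]; omega
    simp only [h1, Bool.false_eq_true, if_false, if_pos hpos]
    rw [PySem.List.foldl_append_eq_flatMap
      (g := fun kv : String × List (String × Int) => get_list_inner kv.2 (depth - 1)),
      pvLoop_outer d depth [] [] hpos hne2]
    simp [pvLoop, get_list_inner_eq]
  · subst hnil
    simp [pvLoop]
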